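-- pv_equiv track=rewrite | github.com/SergioEslava/ProceduralRoomGeneration | generator/generator.py | find_adjacent_rooms
-- ===== SOURCE A (Python) =====
-- def find_adjacent_rooms(room, rooms):
--     x, y, width, height, room_id = room
--     adjacent = {"bottom": [], "left": [], "top": [], "right": []}
--
--     for other in rooms:
--         if other == room:
--             continue
--         ox, oy, owidth, oheight, other_id = other
--         if y == oy + oheight and x < ox + owidth and x + width > ox:
--             adjacent["bottom"].append(other_id)
--         if y + height == oy and x < ox + owidth and x + width > ox:
--             adjacent["top"].append(other_id)
--         if x == ox + owidth and y < oy + oheight and y + height > oy: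
--             adjacent["left"].append(other_id)
--         if x + width == ox and y < oy + oheight and y + height > oy:
--             adjacent["right"].append(other_id)
--
--     return adjacent
-- ===== SOURCE B (Python) =====
-- def find_adjacent_rooms(room, rooms):
--     x, y, width, height, room_id = room
--     # Index other rooms by the edge coordinate relevant to each side, so each
--     # side becomes a single dict lookup plus an overlap filter.
--     by_top, by_bottom, by_right, by_left = {}, {}, {}, {}
--     for other in rooms:
--         if other == room:
--             continue
--         ox, oy, ow, oh, oid = other
--         by_top.setdefault(oy + oh, []).append((ox, ow, oid))
--         by_bottom.setdefault(oy, []).append((ox, ow, oid))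
--         by_right.setdefault(ox + ow, []).append((oy, oh, oid))
--         by_left.setdefault(ox, []).append((oy, oh, oid))
--     return {
--         "bottom": [oid for (ox, ow, oid) in by_top.get(y, [])
--                    if x < ox + ow and x + width > ox],
--         "left": [oid for (oy, oh, oid) in by_right.get(x, [])
--                  if y < oy + oh and y + height > oy],
--         "top": [oid for (ox, ow, oid) in by_bottom.get(y + height, [])
--                 if x < ox + ow and x + width > ox],
--         "right": [oid for (oy, oh, oid) in by_left.get(x + width, [])
--                   if y < oy + oh and y + height > oy],
--     }
-- ===== Notes on version B (the rewrite author's own statement) =====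
-- stated objective: alternative
-- what changed: Instead of testing all four side conditions against every room in the loop, B builds four dictionaries indexing the other rooms by their relevant edge coordinate in one pass, then answers each side with a single dict lookup followed by an overlap filter.
import Mathlib
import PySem

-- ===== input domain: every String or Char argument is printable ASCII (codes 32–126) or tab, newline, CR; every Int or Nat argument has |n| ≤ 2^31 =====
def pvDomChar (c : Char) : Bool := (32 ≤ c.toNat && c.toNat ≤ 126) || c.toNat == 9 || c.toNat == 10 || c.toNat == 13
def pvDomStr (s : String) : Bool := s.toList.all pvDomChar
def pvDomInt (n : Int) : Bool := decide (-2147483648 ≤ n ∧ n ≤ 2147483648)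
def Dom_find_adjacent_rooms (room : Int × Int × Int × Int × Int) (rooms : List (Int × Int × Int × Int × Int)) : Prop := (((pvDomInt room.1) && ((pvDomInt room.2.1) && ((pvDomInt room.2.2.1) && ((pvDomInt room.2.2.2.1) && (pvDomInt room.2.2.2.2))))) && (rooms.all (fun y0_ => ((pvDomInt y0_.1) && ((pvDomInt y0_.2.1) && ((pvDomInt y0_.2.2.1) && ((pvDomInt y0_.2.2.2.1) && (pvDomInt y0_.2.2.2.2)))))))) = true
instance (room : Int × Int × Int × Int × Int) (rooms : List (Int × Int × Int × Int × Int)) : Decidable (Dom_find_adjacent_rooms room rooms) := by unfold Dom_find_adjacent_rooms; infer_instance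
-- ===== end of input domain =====

-- B indexes the other rooms by edge coordinate in four dicts built in one pass, then answers each
-- side by a dict lookup plus an overlap filter ('alternative'; same O(n) cost, different structure).


-- ===== PORT A =====
-- A: one pass, skipping `room`, appending each side's id into a 4-way accumulator (the dict's four lists).
def stepA (room : Int × Int × Int × Int × Int)
    (acc : List Int × List Int × List Int × List Int)
    (other : Int × Int × Int × Int × Int) : List Int × List Int × List Int × List Int :=
  if other = room then acc
  else
    let x := room.1; let y := room.2.1; let width := room.2.2.1; let height := room.2.2.2.1
    let ox := other.1; let oy := other.2.1; let owidth := other.2.2.1; let oheight := other.2.2.2.1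
    let other_id := other.2.2.2.2
    let b := if y = oy + oheight ∧ x < ox + owidth ∧ x + width > ox then acc.1 ++ [other_id] else acc.1
    let t := if y + height = oy ∧ x < ox + owidth ∧ x + width > ox then acc.2.2.1 ++ [other_id] else acc.2.2.1
    let l := if x = ox + owidth ∧ y < oy + oheight ∧ y + height > oy then acc.2.1 ++ [other_id] else acc.2.1
    let r := if x + width = ox ∧ y < oy + oheight ∧ y + height > oy then acc.2.2.2 ++ [other_id] else acc.2.2.2
    (b, l, t, r)

def find_adjacent_rooms (room : Int × Int × Int × Int × Int) (rooms : List (Int × Int × Int × Int × Int)) : List (String × List Int) :=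
  let s := rooms.foldl (stepA room) (([] : List Int), ([] : List Int), ([] : List Int), ([] : List Int))
  [("bottom", s.1), ("left", s.2.1), ("top", s.2.2.1), ("right", s.2.2.2)]

-- ===== PORT B =====
-- B: one pass building four edge-coordinate indices (dicts), then one lookup + overlap filter per side.
def addEntry (d : PySem.Dict Int (List (Int × Int × Int))) (k : Int) (v : Int × Int × Int) :
    PySem.Dict Int (List (Int × Int × Int)) :=
  d.insert k (d.getD k [] ++ [v])      -- setdefault(k, []).append(v)

def stepB (room : Int × Int × Int × Int × Int)
    (acc : PySem.Dict Int (List (Int × Int × Int)) × PySem.Dict Int (List (Int × Int × Int)) ×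
           PySem.Dict Int (List (Int × Int × Int)) × PySem.Dict Int (List (Int × Int × Int)))
    (o : Int × Int × Int × Int × Int) :
    PySem.Dict Int (List (Int × Int × Int)) × PySem.Dict Int (List (Int × Int × Int)) ×
    PySem.Dict Int (List (Int × Int × Int)) × PySem.Dict Int (List (Int × Int × Int)) :=
  if o = room then acc
  else
    (addEntry acc.1 (o.2.1 + o.2.2.2.1) (o.1, o.2.2.1, o.2.2.2.2),        -- by_top
     addEntry acc.2.1 o.2.1 (o.1, o.2.2.1, o.2.2.2.2),                    -- by_bottom
     addEntry acc.2.2.1 (o.1 + o.2.2.1) (o.2.1, o.2.2.2.1, o.2.2.2.2),    -- by_right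
     addEntry acc.2.2.2 o.1 (o.2.1, o.2.2.2.1, o.2.2.2.2))                -- by_left

def find_adjacent_rooms_alt (room : Int × Int × Int × Int × Int) (rooms : List (Int × Int × Int × Int × Int)) : List (String × List Int) :=
  let x := room.1; let y := room.2.1; let width := room.2.2.1; let height := room.2.2.2.1
  let idx := rooms.foldl (stepB room) (PySem.Dict.empty, PySem.Dict.empty, PySem.Dict.empty, PySem.Dict.empty)
  [("bottom", ((idx.1.getD y []).filter (fun e => decide (x < e.1 + e.2.1 ∧ x + width > e.1))).map (fun e => e.2.2)),
   ("left",   ((idx.2.2.1.getD x []).filter (fun e => decide (y < e.1 + e.2.1 ∧ y + height > e.1))).map (fun e => e.2.2)),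
   ("top",    ((idx.2.1.getD (y + height) []).filter (fun e => decide (x < e.1 + e.2.1 ∧ x + width > e.1))).map (fun e => e.2.2)),
   ("right",  ((idx.2.2.2.getD (x + width) []).filter (fun e => decide (y < e.1 + e.2.1 ∧ y + height > e.1))).map (fun e => e.2.2))]

-- ===== PRECONDITION & SPEC =====
def Spec_find_adjacent_rooms (room : Int × Int × Int × Int × Int) (rooms : List (Int × Int × Int × Int × Int)) (out : List (String × List Int)) : Prop := out = find_adjacent_rooms_alt room rooms
instance (room : Int × Int × Int × Int × Int) (rooms : List (Int × Int × Int × Int × Int)) (out : List (String × List Int)) : Decidable (Spec_find_adjacent_rooms room rooms out) := by unfold Spec_find_adjacent_rooms; infer_instance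

-- ===== CLAIM (what is proved, stated in full; the proofs are below) =====
def Claim_equal_find_adjacent_rooms : Prop := ∀ (room : Int × Int × Int × Int × Int) (rooms : List (Int × Int × Int × Int × Int)), Dom_find_adjacent_rooms room rooms → Spec_find_adjacent_rooms room rooms (find_adjacent_rooms room rooms)

-- ===== LEMMAS AND PROOFS =====

-- A's loop as four filterMaps over the others.
theorem loop_eq (room : Int × Int × Int × Int × Int) (rooms : List (Int × Int × Int × Int × Int))
    (b l t r : List Int) :
    rooms.foldl (stepA room) (b, l, t, r)
    = (b ++ (rooms.filter (fun o => decide (o ≠ room))).filterMap (fun o => if room.2.1 = o.2.1 + o.2.2.2.1 ∧ room.1 < o.1 + o.2.2.1 ∧ room.1 + room.2.2.1 > o.1 then some o.2.2.2.2 else none),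
       l ++ (rooms.filter (fun o => decide (o ≠ room))).filterMap (fun o => if room.1 = o.1 + o.2.2.1 ∧ room.2.1 < o.2.1 + o.2.2.2.1 ∧ room.2.1 + room.2.2.2.1 > o.2.1 then some o.2.2.2.2 else none),
       t ++ (rooms.filter (fun o => decide (o ≠ room))).filterMap (fun o => if room.2.1 + room.2.2.2.1 = o.2.1 ∧ room.1 < o.1 + o.2.2.1 ∧ room.1 + room.2.2.1 > o.1 then some o.2.2.2.2 else none),
       r ++ (rooms.filter (fun o => decide (o ≠ room))).filterMap (fun o => if room.1 + room.2.2.1 = o.1 ∧ room.2.1 < o.2.1 + o.2.2.2.1 ∧ room.2.1 + room.2.2.2.1 > o.2.1 then some o.2.2.2.2 else none)) := by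
  induction rooms generalizing b l t r with
  | nil => simp
  | cons hd tl ih =>
    by_cases hh : hd = room
    · rw [List.foldl_cons, show stepA room (b, l, t, r) hd = (b, l, t, r) by simp [stepA, hh], ih,
        show List.filter (fun o => decide (o ≠ room)) (hd :: tl)
             = List.filter (fun o => decide (o ≠ room)) tl by simp [hh]]
    · rw [List.foldl_cons,
        show stepA room (b, l, t, r) hd =
          ((if room.2.1 = hd.2.1 + hd.2.2.2.1 ∧ room.1 < hd.1 + hd.2.2.1 ∧ room.1 + room.2.2.1 > hd.1 then b ++ [hd.2.2.2.2] else b),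
           (if room.1 = hd.1 + hd.2.2.1 ∧ room.2.1 < hd.2.1 + hd.2.2.2.1 ∧ room.2.1 + room.2.2.2.1 > hd.2.1 then l ++ [hd.2.2.2.2] else l),
           (if room.2.1 + room.2.2.2.1 = hd.2.1 ∧ room.1 < hd.1 + hd.2.2.1 ∧ room.1 + room.2.2.1 > hd.1 then t ++ [hd.2.2.2.2] else t),
           (if room.1 + room.2.2.1 = hd.1 ∧ room.2.1 < hd.2.1 + hd.2.2.2.1 ∧ room.2.1 + room.2.2.2.1 > hd.2.1 then r ++ [hd.2.2.2.2] else r))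
          by simp [stepA, hh],
        ih,
        show List.filter (fun o => decide (o ≠ room)) (hd :: tl)
             = hd :: List.filter (fun o => decide (o ≠ room)) tl by simp [hh]]
      simp only [List.filterMap_cons]
      split_ifs <;> simp

-- one-dict building step (projection target of stepB)
def bstep (room : Int × Int × Int × Int × Int) (key : (Int × Int × Int × Int × Int) → Int)
    (sh : (Int × Int × Int × Int × Int) → Int × Int × Int)
    (d : PySem.Dict Int (List (Int × Int × Int))) (o : Int × Int × Int × Int × Int) :
    PySem.Dict Int (List (Int × Int × Int)) :=
  if o = room then d else addEntry d (key o) (sh o)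

def shH (o : Int × Int × Int × Int × Int) : Int × Int × Int := (o.1, o.2.2.1, o.2.2.2.2)
def shV (o : Int × Int × Int × Int × Int) : Int × Int × Int := (o.2.1, o.2.2.2.1, o.2.2.2.2)

theorem foldB_proj (room : Int × Int × Int × Int × Int) (rooms : List (Int × Int × Int × Int × Int))
    (d1 d2 d3 d4 : PySem.Dict Int (List (Int × Int × Int))) :
    rooms.foldl (stepB room) (d1, d2, d3, d4)
    = (rooms.foldl (bstep room (fun o => o.2.1 + o.2.2.2.1) shH) d1,
       rooms.foldl (bstep room (fun o => o.2.1) shH) d2,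
       rooms.foldl (bstep room (fun o => o.1 + o.2.2.1) shV) d3,
       rooms.foldl (bstep room (fun o => o.1) shV) d4) := by
  induction rooms generalizing d1 d2 d3 d4 with
  | nil => rfl
  | cons hd tl ih =>
    by_cases hh : hd = room <;> simp [stepB, bstep, hh, ih, shH, shV]

theorem getD_fold (room : Int × Int × Int × Int × Int) (key : (Int × Int × Int × Int × Int) → Int)
    (sh : (Int × Int × Int × Int × Int) → Int × Int × Int)
    (rooms : List (Int × Int × Int × Int × Int)) (d : PySem.Dict Int (List (Int × Int × Int))) (k : Int) :
    (rooms.foldl (bstep room key sh) d).getD k []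
    = d.getD k [] ++ (rooms.filter (fun o => decide (o ≠ room ∧ key o = k))).map sh := by
  induction rooms generalizing d with
  | nil => simp
  | cons hd tl ih =>
    by_cases hh : hd = room
    · simp [bstep, hh, ih]
    · rw [List.foldl_cons, show bstep room key sh d hd = addEntry d (key hd) (sh hd) from if_neg hh, ih]
      by_cases hk : key hd = k
      · subst hk
        rw [show (addEntry d (key hd) (sh hd)).getD (key hd) [] = d.getD (key hd) [] ++ [sh hd] by
              simp [addEntry]]
        simp [hh]
      · have hk' : ¬ k = key hd := fun h => hk h.symm
        rw [show (addEntry d (key hd) (sh hd)).getD k [] = d.getD k [] by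
              simp [addEntry, PySem.Dict.getD_insert, hk']]
        simp [hh, hk]

-- lookup-then-overlap-filter equals the single filterMap with the side's full condition
theorem bridge (l : List (Int × Int × Int × Int × Int)) (room : Int × Int × Int × Int × Int)
    (P : (Int × Int × Int × Int × Int) → Prop) [DecidablePred P]
    (key : (Int × Int × Int × Int × Int) → Int) (k : Int)
    (sh : (Int × Int × Int × Int × Int) → Int × Int × Int)
    (ov : (Int × Int × Int) → Prop) [DecidablePred ov]
    (hP : ∀ o, P o ↔ (key o = k ∧ ov (sh o))) :
    ((((l.filter (fun o => decide (o ≠ room ∧ key o = k))).map sh).filter (fun e => decide (ov e))).map (fun e => e.2.2))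
    = (l.filter (fun o => decide (o ≠ room))).filterMap (fun o => if P o then some (sh o).2.2 else none) := by
  induction l with
  | nil => simp
  | cons hd tl ih =>
    by_cases h1 : hd = room
    · rw [List.filter_cons_of_neg (by simp [h1]), List.filter_cons_of_neg (by simp [h1])]
      exact ih
    · by_cases h2 : key hd = k
      · by_cases h3 : ov (sh hd)
        · have e4 : P hd := (hP hd).mpr ⟨h2, h3⟩
          rw [List.filter_cons_of_pos (by simp [h1, h2]), List.map_cons,
              List.filter_cons_of_pos (by simp [h3]), List.map_cons,
              List.filter_cons_of_pos (by simp [h1]),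
              List.filterMap_cons_some (by rw [if_pos e4]), ih]
        · have e4 : ¬ P hd := fun h => h3 ((hP hd).mp h).2
          rw [List.filter_cons_of_pos (by simp [h1, h2]), List.map_cons,
              List.filter_cons_of_neg (by simp [h3]),
              List.filter_cons_of_pos (by simp [h1]),
              List.filterMap_cons_none (by rw [if_neg e4])]
          exact ih
      · have e4 : ¬ P hd := fun h => h2 ((hP hd).mp h).1
        rw [List.filter_cons_of_neg (by simp [h2]),
            List.filter_cons_of_pos (by simp [h1]),
            List.filterMap_cons_none (by rw [if_neg e4])]
        exact ih

-- ===== VERDICT (by name: the statement is the Claim_ definition above) =====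
theorem find_adjacent_rooms_spec : Claim_equal_find_adjacent_rooms := by
  intro room rooms _
  unfold Spec_find_adjacent_rooms find_adjacent_rooms find_adjacent_rooms_alt
  rw [loop_eq, foldB_proj]
  simp only [getD_fold, PySem.Dict.getD_empty, List.nil_append]
  rw [bridge rooms room (fun o => room.2.1 = o.2.1 + o.2.2.2.1 ∧ room.1 < o.1 + o.2.2.1 ∧ room.1 + room.2.2.1 > o.1)
        (fun o => o.2.1 + o.2.2.2.1) room.2.1 shH
        (fun e => room.1 < e.1 + e.2.1 ∧ room.1 + room.2.2.1 > e.1)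
        (fun o => by simp [shH]; tauto),
      bridge rooms room (fun o => room.1 = o.1 + o.2.2.1 ∧ room.2.1 < o.2.1 + o.2.2.2.1 ∧ room.2.1 + room.2.2.2.1 > o.2.1)
        (fun o => o.1 + o.2.2.1) room.1 shV
        (fun e => room.2.1 < e.1 + e.2.1 ∧ room.2.1 + room.2.2.2.1 > e.1)
        (fun o => by simp [shV]; tauto),
      bridge rooms room (fun o => room.2.1 + room.2.2.2.1 = o.2.1 ∧ room.1 < o.1 + o.2.2.1 ∧ room.1 + room.2.2.1 > o.1)
        (fun o => o.2.1) (room.2.1 + room.2.2.2.1) shH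
        (fun e => room.1 < e.1 + e.2.1 ∧ room.1 + room.2.2.1 > e.1)
        (fun o => by simp [shH]; tauto),
      bridge rooms room (fun o => room.1 + room.2.2.1 = o.1 ∧ room.2.1 < o.2.1 + o.2.2.2.1 ∧ room.2.1 + room.2.2.2.1 > o.2.1)
        (fun o => o.1) (room.1 + room.2.2.1) shV
        (fun e => room.2.1 < e.1 + e.2.1 ∧ room.2.1 + room.2.2.2.1 > e.1)
        (fun o => by simp [shV]; tauto)]
  simp [shH, shV]
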